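-- pv_equiv track=rewrite | github.com/robinali34/leetcode-anki-web | card_generator.py | _generate_algorithm_hint
-- ===== SOURCE A (Python) =====
-- def _generate_algorithm_hint(problem):
--     """Generate algorithm hints based on problem tags"""
--     tags = [tag.lower() for tag in problem.get('tags', [])]
--
--     hints = []
--     if 'array' in tags:
--         hints.append("Consider array traversal and manipulation")
--     if 'hash table' in tags or 'hash' in tags:
--         hints.append("Use hash table for O(1) lookups")
--     if 'two pointers' in tags:
--         hints.append("Consider using two pointers technique")
--     if 'sliding window' in tags:
--         hints.append("Use sliding window approach")
--     if 'dynamic programming' in tags or 'dp' in tags: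
--         hints.append("Consider dynamic programming solution")
--     if 'binary search' in tags:
--         hints.append("Use binary search for optimization")
--     if 'tree' in tags or 'binary tree' in tags:
--         hints.append("Consider tree traversal (DFS/BFS)")
--     if 'graph' in tags:
--         hints.append("Use graph algorithms (DFS/BFS)")
--
--     if not hints:
--         hints.append("Analyze the problem step by step")
--
--     return "\n".join(hints)
-- ===== SOURCE B (Python) =====
-- # Inverted index: one pass over the tags, looking each up in a precomputed
-- # tag -> (rule index, message) dict; dedupe by rule index; emit in index order.
-- HINT_BY_TAG = {
--     'array': (0, "Consider array traversal and manipulation"),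
--     'hash table': (1, "Use hash table for O(1) lookups"),
--     'hash': (1, "Use hash table for O(1) lookups"),
--     'two pointers': (2, "Consider using two pointers technique"),
--     'sliding window': (3, "Use sliding window approach"),
--     'dynamic programming': (4, "Consider dynamic programming solution"),
--     'dp': (4, "Consider dynamic programming solution"),
--     'binary search': (5, "Use binary search for optimization"),
--     'tree': (6, "Consider tree traversal (DFS/BFS)"),
--     'binary tree': (6, "Consider tree traversal (DFS/BFS)"),
--     'graph': (7, "Use graph algorithms (DFS/BFS)"),
-- }
--
--
-- def _generate_algorithm_hint(problem):
--     """Generate algorithm hints by indexing the tags into the hint table"""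
--     found = {}
--     for tag in problem.get('tags', []):
--         entry = HINT_BY_TAG.get(tag.lower())
--         if entry is not None:
--             found[entry[0]] = entry[1]
--     if not found:
--         return "Analyze the problem step by step"
--     return "\n".join(found[i] for i in sorted(found))
-- ===== Notes on version B (the rewrite author's own statement) =====
-- stated objective: alternative
-- what changed: Inverts the traversal: instead of eight membership tests scanning the tag list, B makes one pass over the tags, looks each up in a precomputed tag->(rule index, message) dict, dedupes hits by rule index in a dict, and joins the messages of the sorted indices.
import Mathlib
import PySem

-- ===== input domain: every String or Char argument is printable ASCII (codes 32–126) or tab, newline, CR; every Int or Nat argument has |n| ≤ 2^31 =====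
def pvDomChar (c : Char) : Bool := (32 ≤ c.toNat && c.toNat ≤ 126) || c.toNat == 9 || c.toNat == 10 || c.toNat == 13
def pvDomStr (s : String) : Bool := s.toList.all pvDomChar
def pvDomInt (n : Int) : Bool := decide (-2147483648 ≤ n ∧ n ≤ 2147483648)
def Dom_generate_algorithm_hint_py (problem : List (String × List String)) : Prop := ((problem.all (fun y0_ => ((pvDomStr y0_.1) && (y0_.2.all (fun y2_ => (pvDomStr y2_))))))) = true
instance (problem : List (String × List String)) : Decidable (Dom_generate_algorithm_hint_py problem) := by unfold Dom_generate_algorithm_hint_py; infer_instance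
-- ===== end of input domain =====

-- B inverts the traversal: one pass over the tags through a precomputed tag -> (rule index, message)
-- dict, deduped by rule index, messages emitted in sorted index order (objective: alternative).

-- ===== PORT A =====
def generate_algorithm_hint_py (problem : List (String × List String)) : String :=
  let tags := ((PySem.Dict.mk problem).getD "tags" []).map PySem.Str.lower
  let hints : List String := []
  let hints := if tags.contains "array" then hints ++ ["Consider array traversal and manipulation"] else hints
  let hints := if tags.contains "hash table" || tags.contains "hash" then hints ++ ["Use hash table for O(1) lookups"] else hints
  let hints := if tags.contains "two pointers" then hints ++ ["Consider using two pointers technique"] else hints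
  let hints := if tags.contains "sliding window" then hints ++ ["Use sliding window approach"] else hints
  let hints := if tags.contains "dynamic programming" || tags.contains "dp" then hints ++ ["Consider dynamic programming solution"] else hints
  let hints := if tags.contains "binary search" then hints ++ ["Use binary search for optimization"] else hints
  let hints := if tags.contains "tree" || tags.contains "binary tree" then hints ++ ["Consider tree traversal (DFS/BFS)"] else hints
  let hints := if tags.contains "graph" then hints ++ ["Use graph algorithms (DFS/BFS)"] else hints
  let hints := if hints.isEmpty then hints ++ ["Analyze the problem step by step"] else hints
  PySem.Str.join "\n" hints

-- ===== PORT B =====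
def pvHintByTag : PySem.Dict String (Int × String) := PySem.Dict.mk
  [ ("array", (0, "Consider array traversal and manipulation"))
  , ("hash table", (1, "Use hash table for O(1) lookups"))
  , ("hash", (1, "Use hash table for O(1) lookups"))
  , ("two pointers", (2, "Consider using two pointers technique"))
  , ("sliding window", (3, "Use sliding window approach"))
  , ("dynamic programming", (4, "Consider dynamic programming solution"))
  , ("dp", (4, "Consider dynamic programming solution"))
  , ("binary search", (5, "Use binary search for optimization"))
  , ("tree", (6, "Consider tree traversal (DFS/BFS)"))
  , ("binary tree", (6, "Consider tree traversal (DFS/BFS)"))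
  , ("graph", (7, "Use graph algorithms (DFS/BFS)"))
  ]

def generate_algorithm_hint_py_alt (problem : List (String × List String)) : String :=
  let found := ((PySem.Dict.mk problem).getD "tags" []).foldl
    (fun d tag => match pvHintByTag.get? (PySem.Str.lower tag) with
      | some entry => d.insert entry.1 entry.2
      | none => d)
    PySem.Dict.empty
  if found.items.isEmpty then "Analyze the problem step by step"
  -- found[i] for i in sorted(found): every i is a key of found, so getD never takes its default
  else PySem.Str.join "\n" ((PySem.List.sorted found.keys (fun i => i) false).map (fun i => found.getD i ""))

-- ===== PRECONDITION & SPEC =====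
def Spec_generate_algorithm_hint_py (problem : List (String × List String)) (out : String) : Prop := out = generate_algorithm_hint_py_alt problem
instance (problem : List (String × List String)) (out : String) : Decidable (Spec_generate_algorithm_hint_py problem out) := by unfold Spec_generate_algorithm_hint_py; infer_instance

-- ===== CLAIM (what is proved, stated in full; the proofs are below) =====
def Claim_equal_generate_algorithm_hint_py : Prop := ∀ (problem : List (String × List String)), Dom_generate_algorithm_hint_py problem → Spec_generate_algorithm_hint_py problem (generate_algorithm_hint_py problem)

-- ===== LEMMAS AND PROOFS =====

-- proof-only helpers: the loop step, the message of a rule index, the trigger condition of a rule index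
def pvStep (d : PySem.Dict Int String) (t : String) : PySem.Dict Int String :=
  match pvHintByTag.get? t with
  | some entry => d.insert entry.1 entry.2
  | none => d

def pvMsg (i : Int) : String :=
  if i = 0 then "Consider array traversal and manipulation"
  else if i = 1 then "Use hash table for O(1) lookups"
  else if i = 2 then "Consider using two pointers technique"
  else if i = 3 then "Use sliding window approach"
  else if i = 4 then "Consider dynamic programming solution"
  else if i = 5 then "Use binary search for optimization"
  else if i = 6 then "Consider tree traversal (DFS/BFS)"
  else if i = 7 then "Use graph algorithms (DFS/BFS)"
  else ""

def pvCond (ts : List String) (i : Int) : Bool :=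
  ts.any (fun t => (pvHintByTag.get? t).any (fun e => e.1 == i))

lemma pv_table_msg : ∀ p ∈ pvHintByTag.items, p.2.2 = pvMsg p.2.1 := by decide

lemma pv_table_idx : ∀ p ∈ pvHintByTag.items, p.2.1 ∈ ([0,1,2,3,4,5,6,7] : List Int) := by decide

lemma get?_pvStep (d : PySem.Dict Int String) (t : String) (i : Int) :
    (pvStep d t).get? i =
      if (pvHintByTag.get? t).any (fun e => e.1 == i) then some (pvMsg i) else d.get? i := by
  unfold pvStep
  cases h : pvHintByTag.get? t with
  | none => simp
  | some e =>
    have hm : e.2 = pvMsg e.1 :=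
      pv_table_msg (t, e) (PySem.Dict.mem_items_of_get?_eq_some _ h)
    rw [PySem.Dict.get?_insert]
    simp only [Option.any_some]
    by_cases hi : i = e.1
    · subst hi; simp [hm]
    · have hne : (e.1 == i) = false := by simp [Ne.symm hi]
      simp [hi, hne]

lemma get?_pvFold (ts : List String) (d : PySem.Dict Int String) (i : Int) :
    (ts.foldl pvStep d).get? i = if pvCond ts i then some (pvMsg i) else d.get? i := by
  induction ts generalizing d with
  | nil => simp [pvCond]
  | cons t ts ih =>
    simp only [List.foldl_cons, pvCond, List.any_cons]
    rw [ih, get?_pvStep]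
    simp only [pvCond]
    by_cases ht : ((pvHintByTag.get? t).any (fun e => e.1 == i)) = true <;> simp [ht]

lemma nodup_keys_pvFold (ts : List String) (d : PySem.Dict Int String)
    (h : d.keys.Nodup) : (ts.foldl pvStep d).keys.Nodup := by
  induction ts generalizing d with
  | nil => exact h
  | cons t ts ih =>
    refine ih _ ?_
    unfold pvStep
    cases pvHintByTag.get? t with
    | none => exact h
    | some e => exact PySem.Dict.nodup_keys_insert _ _ _ h

lemma mem_keys_pvFold (ts : List String) (i : Int) :
    i ∈ (ts.foldl pvStep PySem.Dict.empty).keys ↔ pvCond ts i = true := by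
  rw [← not_iff_not, ← PySem.Dict.get?_eq_none_iff_not_mem_keys, get?_pvFold]
  cases h : pvCond ts i <;> simp [PySem.Dict.get?_empty]

lemma pvCond_mem (ts : List String) (i : Int) (h : pvCond ts i = true) :
    i ∈ ([0,1,2,3,4,5,6,7] : List Int) := by
  unfold pvCond at h
  simp only [List.any_eq_true] at h
  obtain ⟨t, _, ht⟩ := h
  cases he : pvHintByTag.get? t with
  | none => rw [he] at ht; simp at ht
  | some e =>
    rw [he] at ht
    simp only [Option.any_some, beq_iff_eq] at ht
    exact ht ▸ pv_table_idx (t, e) (PySem.Dict.mem_items_of_get?_eq_some _ he)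

-- B, rewritten through the trigger condition
lemma B_eq (ts : List String) :
    (let found := ts.foldl pvStep PySem.Dict.empty
     if found.items.isEmpty then "Analyze the problem step by step"
     else PySem.Str.join "\n" ((PySem.List.sorted found.keys (fun i => i) false).map (fun i => found.getD i "")))
      =
    (let ys := ([0,1,2,3,4,5,6,7] : List Int).filter (pvCond ts)
     if ys.isEmpty then "Analyze the problem step by step"
     else PySem.Str.join "\n" (ys.map pvMsg)) := by
  have hnd : (ts.foldl pvStep PySem.Dict.empty).keys.Nodup :=
    nodup_keys_pvFold ts _ (PySem.Dict.nodup_keys_empty)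
  have hysnd : (([0,1,2,3,4,5,6,7] : List Int).filter (pvCond ts)).Nodup :=
    List.Nodup.filter _ (by decide)
  have hperm : (([0,1,2,3,4,5,6,7] : List Int).filter (pvCond ts)).Perm
      (ts.foldl pvStep PySem.Dict.empty).keys := by
    rw [List.perm_ext_iff_of_nodup hysnd hnd]
    intro i
    rw [List.mem_filter, mem_keys_pvFold]
    constructor
    · exact fun h => h.2
    · exact fun h => ⟨pvCond_mem ts i h, h⟩
  have hsorted : PySem.List.sorted (ts.foldl pvStep PySem.Dict.empty).keys (fun i => i) false
      = ([0,1,2,3,4,5,6,7] : List Int).filter (pvCond ts) :=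
    PySem.List.sorted_eq_of_perm_of_pairwise_lt _ _ (fun i => i) hperm
      (List.Pairwise.filter (pvCond ts) (by decide))
  have hlen : (ts.foldl pvStep PySem.Dict.empty).items.length
      = (([0,1,2,3,4,5,6,7] : List Int).filter (pvCond ts)).length := by
    have h2 := hperm.length_eq
    simp only [PySem.Dict.keys, List.length_map] at h2
    omega
  have hempty : (ts.foldl pvStep PySem.Dict.empty).items.isEmpty
      = (([0,1,2,3,4,5,6,7] : List Int).filter (pvCond ts)).isEmpty := by
    rw [Bool.eq_iff_iff]
    simp only [List.isEmpty_iff, ← List.length_eq_zero_iff, hlen]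
  have hmap : (([0,1,2,3,4,5,6,7] : List Int).filter (pvCond ts)).map
        (fun i => (ts.foldl pvStep PySem.Dict.empty).getD i "")
      = (([0,1,2,3,4,5,6,7] : List Int).filter (pvCond ts)).map pvMsg :=
    List.map_congr_left (fun i hi => PySem.Dict.getD_of_get?_eq_some _ _
      (by rw [get?_pvFold]; simp [(List.mem_filter.mp hi).2]))
  show (if (ts.foldl pvStep PySem.Dict.empty).items.isEmpty then "Analyze the problem step by step"
      else PySem.Str.join "\n" ((PySem.List.sorted (ts.foldl pvStep PySem.Dict.empty).keys (fun i => i) false).map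
        (fun i => (ts.foldl pvStep PySem.Dict.empty).getD i "")))
    = (if (([0,1,2,3,4,5,6,7] : List Int).filter (pvCond ts)).isEmpty then "Analyze the problem step by step"
      else PySem.Str.join "\n" ((([0,1,2,3,4,5,6,7] : List Int).filter (pvCond ts)).map pvMsg))
  rw [hsorted, hmap, hempty]

lemma any_or_split (l : List String) (p q : String → Bool) :
    (l.any fun x => p x || q x) = (l.any p || l.any q) := by
  rw [Bool.eq_iff_iff]
  simp only [List.any_eq_true, Bool.or_eq_true]
  constructor
  · rintro ⟨x, hx, h | h⟩
    exacts [Or.inl ⟨x, hx, h⟩, Or.inr ⟨x, hx, h⟩]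
  · rintro (⟨x, hx, h⟩ | ⟨x, hx, h⟩)
    exacts [⟨x, hx, Or.inl h⟩, ⟨x, hx, Or.inr h⟩]

-- pointwise: which tag strings trigger each rule index
set_option maxHeartbeats 1600000 in
lemma pvHit0 (t : String) : ((pvHintByTag.get? t).any (fun e => e.1 == (0 : Int))) = ("array" == t) := by
  simp only [pvHintByTag, PySem.Dict.get?_mk_cons]
  split_ifs <;> simp_all [PySem.Dict.get?]
set_option maxHeartbeats 1600000 in
lemma pvHit1 (t : String) : ((pvHintByTag.get? t).any (fun e => e.1 == (1 : Int))) = ("hash table" == t || "hash" == t) := by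
  simp only [pvHintByTag, PySem.Dict.get?_mk_cons]
  split_ifs <;> simp_all [PySem.Dict.get?]
  all_goals (subst_vars; decide)
set_option maxHeartbeats 1600000 in
lemma pvHit2 (t : String) : ((pvHintByTag.get? t).any (fun e => e.1 == (2 : Int))) = ("two pointers" == t) := by
  simp only [pvHintByTag, PySem.Dict.get?_mk_cons]
  split_ifs <;> simp_all [PySem.Dict.get?]
  all_goals (subst_vars; decide)
set_option maxHeartbeats 1600000 in
lemma pvHit3 (t : String) : ((pvHintByTag.get? t).any (fun e => e.1 == (3 : Int))) = ("sliding window" == t) := by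
  simp only [pvHintByTag, PySem.Dict.get?_mk_cons]
  split_ifs <;> simp_all [PySem.Dict.get?]
  all_goals (subst_vars; decide)
set_option maxHeartbeats 1600000 in
lemma pvHit4 (t : String) : ((pvHintByTag.get? t).any (fun e => e.1 == (4 : Int))) = ("dynamic programming" == t || "dp" == t) := by
  simp only [pvHintByTag, PySem.Dict.get?_mk_cons]
  split_ifs <;> simp_all [PySem.Dict.get?]
  all_goals (subst_vars; decide)
set_option maxHeartbeats 1600000 in
lemma pvHit5 (t : String) : ((pvHintByTag.get? t).any (fun e => e.1 == (5 : Int))) = ("binary search" == t) := by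
  simp only [pvHintByTag, PySem.Dict.get?_mk_cons]
  split_ifs <;> simp_all [PySem.Dict.get?]
  all_goals (subst_vars; decide)
set_option maxHeartbeats 1600000 in
lemma pvHit6 (t : String) : ((pvHintByTag.get? t).any (fun e => e.1 == (6 : Int))) = ("tree" == t || "binary tree" == t) := by
  simp only [pvHintByTag, PySem.Dict.get?_mk_cons]
  split_ifs <;> simp_all [PySem.Dict.get?]
  all_goals (subst_vars; decide)
set_option maxHeartbeats 1600000 in
lemma pvHit7 (t : String) : ((pvHintByTag.get? t).any (fun e => e.1 == (7 : Int))) = ("graph" == t) := by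
  simp only [pvHintByTag, PySem.Dict.get?_mk_cons]
  split_ifs <;> simp_all [PySem.Dict.get?]
  all_goals (subst_vars; decide)

lemma pvCond0 (ts : List String) : pvCond ts 0 = ts.contains "array" := by
  unfold pvCond; rw [PySem.List.any_congr_mem (fun t _ => pvHit0 t)]; exact List.any_beq
lemma pvCond1 (ts : List String) : pvCond ts 1 = (ts.contains "hash table" || ts.contains "hash") := by
  unfold pvCond; rw [PySem.List.any_congr_mem (fun t _ => pvHit1 t), any_or_split, List.any_beq, List.any_beq]
lemma pvCond2 (ts : List String) : pvCond ts 2 = ts.contains "two pointers" := by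
  unfold pvCond; rw [PySem.List.any_congr_mem (fun t _ => pvHit2 t)]; exact List.any_beq
lemma pvCond3 (ts : List String) : pvCond ts 3 = ts.contains "sliding window" := by
  unfold pvCond; rw [PySem.List.any_congr_mem (fun t _ => pvHit3 t)]; exact List.any_beq
lemma pvCond4 (ts : List String) : pvCond ts 4 = (ts.contains "dynamic programming" || ts.contains "dp") := by
  unfold pvCond; rw [PySem.List.any_congr_mem (fun t _ => pvHit4 t), any_or_split, List.any_beq, List.any_beq]
lemma pvCond5 (ts : List String) : pvCond ts 5 = ts.contains "binary search" := by
  unfold pvCond; rw [PySem.List.any_congr_mem (fun t _ => pvHit5 t)]; exact List.any_beq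
lemma pvCond6 (ts : List String) : pvCond ts 6 = (ts.contains "tree" || ts.contains "binary tree") := by
  unfold pvCond; rw [PySem.List.any_congr_mem (fun t _ => pvHit6 t), any_or_split, List.any_beq, List.any_beq]
lemma pvCond7 (ts : List String) : pvCond ts 7 = ts.contains "graph" := by
  unfold pvCond; rw [PySem.List.any_congr_mem (fun t _ => pvHit7 t)]; exact List.any_beq

lemma core (ts : List String) :
    (let hints : List String := []
     let hints := if ts.contains "array" then hints ++ ["Consider array traversal and manipulation"] else hints
     let hints := if ts.contains "hash table" || ts.contains "hash" then hints ++ ["Use hash table for O(1) lookups"] else hints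
     let hints := if ts.contains "two pointers" then hints ++ ["Consider using two pointers technique"] else hints
     let hints := if ts.contains "sliding window" then hints ++ ["Use sliding window approach"] else hints
     let hints := if ts.contains "dynamic programming" || ts.contains "dp" then hints ++ ["Consider dynamic programming solution"] else hints
     let hints := if ts.contains "binary search" then hints ++ ["Use binary search for optimization"] else hints
     let hints := if ts.contains "tree" || ts.contains "binary tree" then hints ++ ["Consider tree traversal (DFS/BFS)"] else hints
     let hints := if ts.contains "graph" then hints ++ ["Use graph algorithms (DFS/BFS)"] else hints
     let hints := if hints.isEmpty then hints ++ ["Analyze the problem step by step"] else hints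
     PySem.Str.join "\n" hints)
      =
    (let ys := ([0,1,2,3,4,5,6,7] : List Int).filter (pvCond ts)
     if ys.isEmpty then "Analyze the problem step by step"
     else PySem.Str.join "\n" (ys.map pvMsg)) := by
  simp only [List.filter_cons, List.filter_nil, pvCond0, pvCond1, pvCond2, pvCond3, pvCond4,
    pvCond5, pvCond6, pvCond7]
  generalize ts.contains "array" = b1
  generalize (ts.contains "hash table" || ts.contains "hash") = b2
  generalize ts.contains "two pointers" = b3
  generalize ts.contains "sliding window" = b4
  generalize (ts.contains "dynamic programming" || ts.contains "dp") = b5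
  generalize ts.contains "binary search" = b6
  generalize (ts.contains "tree" || ts.contains "binary tree") = b7
  generalize ts.contains "graph" = b8
  cases b1 <;> cases b2 <;> cases b3 <;> cases b4 <;> cases b5 <;> cases b6 <;> cases b7 <;> cases b8 <;> rfl

-- ===== VERDICT (by name: the statement is the Claim_ definition above) =====
theorem generate_algorithm_hint_py_spec : Claim_equal_generate_algorithm_hint_py := by
  intro problem _
  show generate_algorithm_hint_py problem = generate_algorithm_hint_py_alt problem
  unfold generate_algorithm_hint_py generate_algorithm_hint_py_alt
  rw [show (fun (d : PySem.Dict Int String) (tag : String) =>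
        match pvHintByTag.get? (PySem.Str.lower tag) with
        | some entry => d.insert entry.1 entry.2
        | none => d) = (fun d tag => pvStep d (PySem.Str.lower tag)) from rfl,
      ← List.foldl_map (f := PySem.Str.lower) (g := pvStep)]
  rw [B_eq]
  exact core (((PySem.Dict.mk problem).getD "tags" []).map PySem.Str.lower)
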